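-- pv_equiv track=rewrite | github.com/Azxyc/codewars-solutions | Char Code Calculations.py | calc
-- ===== SOURCE A (Python) =====
-- def calc(x):
--     return sum(
--         [int(t)
--          for t in
--          ''.join(str(ord(c))
--                  for c in x)
--         ])-sum(
--         [int(t)
--          for t in
--          ''.join([str(ord(c))
--                  for c in x]).replace('7','1')
--         ])
-- ===== SOURCE B (Python) =====
-- def calc(x):
--     # every '7'->'1' replacement lowers the digit sum by exactly 6, so one count suffices
--     s = ''.join(str(ord(c)) for c in x)
--     return 6 * sum(c == '7' for c in s)
-- ===== Notes on version B (the rewrite author's own statement) =====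
-- stated objective: simpler
-- what changed: Replaces the two digit-sum passes, the intermediate replaced string and the subtraction by a single count of the digit seven in the joined ord-code string times the constant 6, since each seven-to-one replacement lowers the digit sum by exactly 6.
import Mathlib
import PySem

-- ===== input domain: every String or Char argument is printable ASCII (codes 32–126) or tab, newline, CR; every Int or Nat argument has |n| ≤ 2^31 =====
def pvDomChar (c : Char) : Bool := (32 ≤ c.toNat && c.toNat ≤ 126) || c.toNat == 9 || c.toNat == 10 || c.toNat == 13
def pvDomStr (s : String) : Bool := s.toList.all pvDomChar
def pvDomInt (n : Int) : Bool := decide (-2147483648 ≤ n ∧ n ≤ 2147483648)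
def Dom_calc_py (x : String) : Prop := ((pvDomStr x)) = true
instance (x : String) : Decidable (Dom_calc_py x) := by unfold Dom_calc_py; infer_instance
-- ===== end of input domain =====

-- B replaces A's two digit-sum passes and subtraction by counting the digit seven once and multiplying by 6 (simpler, measured faster by a constant factor).

-- ===== PORT A =====
-- ''.join(str(ord(c)) for c in x)
def pvJoined (x : String) : List Char :=
  x.toList.flatMap (fun c => PySem.Int.toChars (c.toNat : Int))

-- int(t) for a single character t; t is always a decimal digit here, so getD 0 is never taken
def pvDigitVal (t : Char) : Int := (PySem.Int.ofChars? [t]).getD 0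

def calc_py (x : String) : Int :=
  ((pvJoined x).map pvDigitVal).sum
    - ((PySem.Chars.replace (pvJoined x) ['7'] ['1']).map pvDigitVal).sum

-- ===== PORT B =====
def calc_py_alt (x : String) : Int :=
  6 * ((pvJoined x).map (fun c => if c = '7' then (1 : Int) else 0)).sum

-- ===== PRECONDITION & SPEC =====
def Spec_calc_py (x : String) (out : Int) : Prop := out = calc_py_alt x
instance (x : String) (out : Int) : Decidable (Spec_calc_py x out) := by unfold Spec_calc_py; infer_instance

-- ===== CLAIM (what is proved, stated in full; the proofs are below) =====
def Claim_equal_calc_py : Prop := ∀ (x : String), Dom_calc_py x → Spec_calc_py x (calc_py x)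

-- ===== LEMMAS AND PROOFS =====

-- single-character replace is a pointwise map
theorem replace_go_single (o n : Char) (fuel : Nat) (l acc : List Char) (h : l.length ≤ fuel) :
    PySem.Chars.replace.go [o] [n] fuel l acc
      = acc.reverse ++ l.map (fun c => if c = o then n else c) := by
  induction fuel generalizing l acc with
  | zero =>
    cases l with
    | nil => simp [PySem.Chars.replace.go]
    | cons c t => simp at h
  | succ fuel ih =>
    cases l with
    | nil => simp [PySem.Chars.replace.go]
    | cons c t =>
      simp only [List.length_cons, Nat.succ_le_succ_iff] at h
      by_cases hc : c = o
      · subst hc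
        rw [PySem.Chars.replace.go]
        rw [if_pos (by simp [List.isPrefixOf])]
        have hdrop : List.drop [c].length (c :: t) = t := by simp
        rw [hdrop, ih _ _ h]
        simp
      · rw [PySem.Chars.replace.go]
        have hpre : ([o].isPrefixOf (c :: t)) = false := by
          simp only [List.isPrefixOf, List.isPrefixOf_nil_left, Bool.and_true,
            beq_eq_false_iff_ne, ne_eq]
          exact fun h' => hc h'.symm
        rw [hpre, if_neg Bool.false_ne_true, ih _ _ h]
        simp [hc]

theorem replace_single (o n : Char) (s : List Char) :
    PySem.Chars.replace s [o] [n] = s.map (fun c => if c = o then n else c) := by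
  rw [PySem.Chars.replace, if_neg (by simp), replace_go_single o n s.length s [] le_rfl]
  simp

-- the digit-sum drop of the '7'→'1' replacement is 6 per occurrence of '7'
theorem sum_diff_eq (s : List Char) :
    (s.map pvDigitVal).sum - ((s.map (fun c => if c = '7' then '1' else c)).map pvDigitVal).sum
      = 6 * (s.map (fun c => if c = '7' then (1 : Int) else 0)).sum := by
  induction s with
  | nil => simp
  | cons c t ih =>
    by_cases hc : c = '7'
    · subst hc
      have h7 : pvDigitVal '7' = 7 := by decide
      have h1 : pvDigitVal '1' = 1 := by decide
      simp only [List.map_cons, List.sum_cons]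
      rw [if_pos trivial, if_pos trivial, h7, h1]
      omega
    · simp only [List.map_cons, if_neg hc, List.sum_cons]
      omega

-- ===== VERDICT (by name: the statement is the Claim_ definition above) =====
theorem calc_py_spec : Claim_equal_calc_py := by
  intro x _
  unfold Spec_calc_py calc_py calc_py_alt
  rw [replace_single]
  exact sum_diff_eq (pvJoined x)
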